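-- pv_equiv track=rewrite | github.com/tjparmer/node_influence | brute_force_computations.py | attractor_length
-- ===== SOURCE A (Python) =====
-- def attractor_length(diffusion):
--     diffusion=[diffusion[t] for t in diffusion]
--     cycle=1 #assume no limit cycle
--     for i,step in enumerate(diffusion):
--         if step in diffusion[:i]:
--             cycle=i-diffusion.index(step)
--             break
--     return cycle
-- ===== SOURCE B (Python) =====
-- def attractor_length(diffusion):
--     occ = {}
--     for i, step in enumerate(diffusion.values()):
--         occ.setdefault(step, []).append(i)
--     best = None
--     for idxs in occ.values():
--         if len(idxs) > 1 and (best is None or idxs[1] < best[0]):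
--             best = (idxs[1], idxs[0])
--     return best[0] - best[1] if best else 1
-- ===== Notes on version B (the rewrite author's own statement) =====
-- stated objective: alternative
-- what changed: Instead of A's early-exit scan that tests each element against a growing prefix slice and rescans with .index, B groups all positions by state value in one pass (dict of index lists) and then selects, among values occurring at least twice, the (first, second occurrence) pair with the minimal second occurrence, with no early exit.
import Mathlib
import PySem

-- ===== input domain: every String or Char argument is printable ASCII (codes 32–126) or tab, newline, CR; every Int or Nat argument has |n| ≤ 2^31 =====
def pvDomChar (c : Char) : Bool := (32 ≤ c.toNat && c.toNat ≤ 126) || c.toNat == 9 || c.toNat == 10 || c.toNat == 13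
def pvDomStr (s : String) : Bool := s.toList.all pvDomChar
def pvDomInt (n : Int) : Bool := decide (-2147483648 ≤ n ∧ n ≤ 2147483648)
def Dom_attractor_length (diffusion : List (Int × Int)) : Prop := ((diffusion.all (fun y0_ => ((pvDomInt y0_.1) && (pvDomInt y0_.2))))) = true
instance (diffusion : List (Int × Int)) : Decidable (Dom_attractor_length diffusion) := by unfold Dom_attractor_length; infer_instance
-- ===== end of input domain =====

-- B replaces A's early-exit prefix-membership scan by a group-then-select algorithm: one pass
-- collects the positions of each state value, then the answer comes from the pair of first and
-- second occurrence with the minimal second occurrence (objective: alternative).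

-- ===== PORT A =====
-- the for-loop with break: returns 1 when exhausted, else i - diffusion.index(step)
def attrLoopA (values : List Int) : List (Int × Int) → Int
  | [] => 1
  | (i, step) :: rest =>
    if step ∈ PySem.List.slice values (some 0) (some i) then
      -- diffusion.index(step): membership was just checked, so index? is some; getD 0 unreachable
      i - (((PySem.List.index? values step).getD 0 : Nat) : Int)
    else attrLoopA values rest

def attractor_length (diffusion : List (Int × Int)) : Int :=
  let values := (PySem.Dict.ofList diffusion).values
  attrLoopA values (PySem.List.enumerate values 0)

-- ===== PORT B =====
-- occ.setdefault(step, []).append(i)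
def attrOcc (vals : List Int) : PySem.Dict Int (List Int) :=
  (PySem.List.enumerate vals 0).foldl
    (fun d p => d.modify p.2 [] (fun l => l ++ [p.1])) PySem.Dict.empty

-- if len(idxs) > 1 and (best is None or idxs[1] < best[0]): best = (idxs[1], idxs[0])
def bestStep (best : Option (Int × Int)) (idxs : List Int) : Option (Int × Int) :=
  match idxs with
  | f :: s :: _ =>
    match best with
    | none => some (s, f)
    | some b => if s < b.1 then some (s, f) else best
  | _ => best

def attrBest (vals : List Int) : Option (Int × Int) :=
  (attrOcc vals).values.foldl bestStep none

-- return best[0] - best[1] if best else 1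
def attractor_length_alt (diffusion : List (Int × Int)) : Int :=
  match attrBest ((PySem.Dict.ofList diffusion).values) with
  | some b => b.1 - b.2
  | none => 1

-- ===== PRECONDITION & SPEC =====
def Spec_attractor_length (diffusion : List (Int × Int)) (out : Int) : Prop := out = attractor_length_alt diffusion
instance (diffusion : List (Int × Int)) (out : Int) : Decidable (Spec_attractor_length diffusion out) := by unfold Spec_attractor_length; infer_instance

-- ===== CLAIM (what is proved, stated in full; the proofs are below) =====
def Claim_equal_attractor_length : Prop := ∀ (diffusion : List (Int × Int)), Dom_attractor_length diffusion → Spec_attractor_length diffusion (attractor_length diffusion)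

-- ===== LEMMAS AND PROOFS =====

-- A's and B's values as functions of the list of states
def Av (vals : List Int) : Int := attrLoopA vals (PySem.List.enumerate vals 0)

def Bv (vals : List Int) : Int :=
  match attrBest vals with
  | some b => b.1 - b.2
  | none => 1

-- positions of value v in vals, as Ints in increasing order
def posList (vals : List Int) (v : Int) : List Int :=
  ((PySem.List.enumerate vals 0).filter (fun p => p.2 == v)).map (·.1)

-- A's break condition over the whole list
def brk (vals : List Int) : Bool :=
  (PySem.List.enumerate vals 0).any
    (fun p => decide (p.2 ∈ PySem.List.slice vals (some 0) (some p.1)))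

-- the value both sides produce when the appended element is the first repeat
def snocVal (vals : List Int) (x : Int) : Int :=
  if x ∈ vals then (vals.length : Int) - (((PySem.List.index? vals x).getD 0 : Nat) : Int) else 1

theorem slice_ext (vals : List Int) (x : Int) (k : Nat) (hk : k ≤ vals.length) :
    PySem.List.slice (vals ++ [x]) (some 0) (some (k : Int))
      = PySem.List.slice vals (some 0) (some (k : Int)) := by
  rw [PySem.List.slice_zero_start, PySem.List.slice_zero_start,
    PySem.List.slice_to_natCast, PySem.List.slice_to_natCast,
    List.take_append_of_le_length hk]

theorem attrLoopA_append (V : List Int) (L1 L2 : List (Int × Int)) :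
    attrLoopA V (L1 ++ L2)
      = if L1.any (fun p => decide (p.2 ∈ PySem.List.slice V (some 0) (some p.1))) then
          attrLoopA V L1
        else attrLoopA V L2 := by
  induction L1 with
  | nil => simp
  | cons p t ih =>
    obtain ⟨i, step⟩ := p
    rw [List.cons_append, attrLoopA]
    by_cases h : step ∈ PySem.List.slice V (some 0) (some i)
    · rw [if_pos h, List.any_cons]
      simp only [h, decide_true, Bool.true_or, if_true]
      rw [attrLoopA, if_pos h]
    · rw [if_neg h, ih, List.any_cons]
      simp only [h, decide_false, Bool.false_or]
      by_cases ht : t.any (fun p => decide (p.2 ∈ PySem.List.slice V (some 0) (some p.1))) = true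
      · simp only [ht, if_true]
        rw [attrLoopA, if_neg h]
      · simp only [ht]
        simp

theorem loopA_ext (vals : List Int) (x : Int) :
    ∀ L : List (Int × Int), (∀ p ∈ L, ∃ k : Nat, p.1 = (k : Int) ∧ k ≤ vals.length) →
      attrLoopA (vals ++ [x]) L = attrLoopA vals L := by
  intro L hL
  induction L with
  | nil => rfl
  | cons p t ih =>
    obtain ⟨i, step⟩ := p
    obtain ⟨k, hk1, hk2⟩ := hL _ (List.mem_cons_self ..)
    simp only at hk1
    subst hk1
    rw [attrLoopA, attrLoopA, slice_ext vals x k hk2]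
    by_cases h : step ∈ PySem.List.slice vals (some 0) (some (k : Int))
    · rw [if_pos h, if_pos h]
      have hmem : step ∈ vals := by
        rw [PySem.List.slice_zero_start, PySem.List.slice_to_natCast] at h
        exact List.mem_of_mem_take h
      rw [PySem.List.index?_append_of_mem _ hmem]
    · rw [if_neg h, if_neg h]
      exact ih (fun q hq => hL q (List.mem_cons_of_mem _ hq))

theorem brk_ext_any (vals : List Int) (x : Int) :
    ((PySem.List.enumerate vals 0).any
      (fun p => decide (p.2 ∈ PySem.List.slice (vals ++ [x]) (some 0) (some p.1))))
    = brk vals := by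
  apply PySem.List.any_congr_mem
  intro p hp
  rw [PySem.List.mem_enumerate_iff] at hp
  obtain ⟨k, hk, rfl⟩ := hp
  simp only [zero_add]
  rw [slice_ext vals x k (le_of_lt hk)]

theorem brk_snoc (vals : List Int) (x : Int) :
    brk (vals ++ [x]) = (brk vals || decide (x ∈ vals)) := by
  show ((PySem.List.enumerate (vals ++ [x]) 0).any _) = _
  rw [PySem.List.enumerate_append]
  rw [List.any_append, brk_ext_any]
  congr 1
  show (PySem.List.enumerate [x] (0 + (vals.length : Int))).any _ = _
  rw [PySem.List.enumerate_cons]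
  simp only [PySem.List.enumerate_nil, List.any_cons, List.any_nil, Bool.or_false, zero_add]
  congr 1
  rw [PySem.List.slice_zero_start, PySem.List.slice_to_natCast]
  simp

theorem brk_iff (vals : List Int) : brk vals = true ↔ ¬ vals.Nodup := by
  induction vals using List.reverseRecOn with
  | nil => simp [brk, PySem.List.enumerate_nil]
  | append_singleton vals x ih =>
    rw [brk_snoc, List.nodup_append]
    simp only [Bool.or_eq_true, ih, decide_eq_true_eq]
    constructor
    · rintro (h | h) ⟨h1, h2, h3⟩
      · exact h h1
      · exact h3 x h x (List.mem_singleton_self x) rfl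
    · intro h
      by_cases hd : vals.Nodup
      · right
        by_contra hx
        exact h ⟨hd, List.nodup_singleton x, fun a ha b hb => by
          simp at hb; subst hb; intro he; exact hx (he ▸ ha)⟩
      · exact Or.inl hd

theorem A_snoc (vals : List Int) (x : Int) :
    Av (vals ++ [x]) = if ¬ vals.Nodup then Av vals else snocVal vals x := by
  unfold Av
  rw [PySem.List.enumerate_append, attrLoopA_append, brk_ext_any]
  by_cases hd : vals.Nodup
  · rw [if_neg (by simp [brk_iff, hd]), if_neg (by simpa using hd)]
    rw [PySem.List.enumerate_cons]
    rw [attrLoopA]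
    have : (0 : Int) + (vals.length : Int) = ((vals.length : Nat) : Int) := by ring
    rw [this, slice_ext vals x vals.length le_rfl]
    rw [PySem.List.slice_zero_start, PySem.List.slice_to_natCast, List.take_length]
    unfold snocVal
    by_cases hx : x ∈ vals
    · rw [if_pos hx, if_pos hx, PySem.List.index?_append_of_mem _ hx]
    · rw [if_neg hx, if_neg hx]
      rfl
  · rw [if_pos (by rw [brk_iff]; exact hd), if_pos (by simpa using hd)]
    apply loopA_ext
    intro p hp
    rw [PySem.List.mem_enumerate_iff] at hp
    obtain ⟨k, hk, rfl⟩ := hp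
    exact ⟨k, by simp, le_of_lt hk⟩

theorem occ_getD (vals : List Int) (v : Int) :
    (attrOcc vals).getD v [] = posList vals v := by
  unfold attrOcc posList
  have h : (PySem.List.enumerate vals 0).foldl
      (fun d p => d.modify p.2 [] (fun l => l ++ [p.1])) PySem.Dict.empty
    = ((PySem.List.enumerate vals 0).map Prod.swap).foldl
      (fun d p => d.modify p.1 [] (fun l => l ++ [p.2])) PySem.Dict.empty := by
    rw [List.foldl_map]
    congr 1
  rw [h, PySem.Dict.getD_foldl_modify_append, PySem.Dict.getD_empty]
  simp [List.filter_map, List.map_map, Function.comp_def, Prod.swap]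

theorem occ_keys (vals : List Int) : (attrOcc vals).keys = PySem.Set.ofList vals := by
  unfold attrOcc
  rw [PySem.Dict.keys_foldl_modify_key (key := fun p : Int × Int => p.2)]
  rw [PySem.List.map_snd_enumerate]
  rw [PySem.Dict.keys_empty]
  rw [PySem.Set.ofList_eq_foldl]
  rfl

theorem occ_nodup (vals : List Int) : (attrOcc vals).keys.Nodup := by
  unfold attrOcc
  exact PySem.Dict.nodup_keys_foldl_modify_key _ (fun p : Int × Int => p.2) _ _ _
    PySem.Dict.nodup_keys_empty

theorem occ_values (vals : List Int) :
    (attrOcc vals).values = (PySem.Set.ofList vals).map (fun v => posList vals v) := by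
  rw [PySem.Dict.values_eq_map_keys _ (occ_nodup vals) []]
  rw [occ_keys]
  exact List.map_congr_left (fun v _ => occ_getD vals v)

theorem posList_snoc (vals : List Int) (x v : Int) :
    posList (vals ++ [x]) v
      = posList vals v ++ (if v = x then [(vals.length : Int)] else []) := by
  unfold posList
  rw [PySem.List.enumerate_append, List.filter_append, List.map_append]
  congr 1
  rw [PySem.List.enumerate_cons]
  simp only [PySem.List.enumerate_nil]
  by_cases h : v = x
  · subst h; simp
  · simp [Ne.symm h, h, beq_iff_eq]

theorem posList_lt (vals : List Int) (v : Int) :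
    ∀ i ∈ posList vals v, i < (vals.length : Int) := by
  intro i hi
  unfold posList at hi
  simp only [List.mem_map, List.mem_filter] at hi
  obtain ⟨p, ⟨hp, _⟩, rfl⟩ := hi
  rw [PySem.List.mem_enumerate_iff] at hp
  obtain ⟨k, hk, rfl⟩ := hp
  simp
  omega

theorem posList_length (vals : List Int) (v : Int) :
    (posList vals v).length = vals.count v := by
  unfold posList
  rw [List.length_map, ← List.countP_eq_length_filter]
  have h2 : vals.count v = List.countP (fun b => b == v) ((PySem.List.enumerate vals 0).map (·.2)) := by
    rw [PySem.List.map_snd_enumerate, List.count]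
  rw [h2, List.countP_map]
  rfl

theorem posList_first (vals : List Int) (x : Int) (j : Nat)
    (h : PySem.List.index? vals x = some j) :
    ∃ rest, posList vals x = (j : Int) :: rest := by
  rw [PySem.List.index?_eq_some_iff] at h
  obtain ⟨pre, suf, rfl, hlen, hpre⟩ := h
  unfold posList
  rw [PySem.List.enumerate_append, List.filter_append]
  have h1 : (PySem.List.enumerate pre 0).filter (fun p => p.2 == x) = [] := by
    rw [List.filter_eq_nil_iff]
    intro p hp
    rw [PySem.List.mem_enumerate_iff] at hp
    obtain ⟨k, hk, rfl⟩ := hp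
    simp only [beq_iff_eq]
    intro he
    exact hpre (he ▸ pre.getElem_mem hk)
  rw [h1, List.nil_append, PySem.List.enumerate_cons, List.filter_cons]
  simp only [beq_self_eq_true, if_pos]
  rw [List.map_cons]
  exact ⟨_, by rw [show ((0 : Int) + (pre.length : Int), x).1 = ((j : Nat) : Int) by simp [hlen]]⟩

theorem bestStep_short (b : Option (Int × Int)) (l : List Int) (h : l.length ≤ 1) :
    bestStep b l = b := by
  match l with
  | [] => rfl
  | [a] => rfl
  | a :: c :: t => simp at h

theorem fold_short (L : List (List Int)) (b : Option (Int × Int))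
    (h : ∀ l ∈ L, l.length ≤ 1) : L.foldl bestStep b = b := by
  induction L generalizing b with
  | nil => rfl
  | cons l t ih =>
    rw [List.foldl_cons, bestStep_short b l (h l (List.mem_cons_self ..))]
    exact ih b (fun l' hl' => h l' (List.mem_cons_of_mem _ hl'))

theorem bestStep_some (q : Int × Int) (l : List Int) :
    ∃ r, bestStep (some q) l = some r := by
  match l with
  | [] => exact ⟨q, rfl⟩
  | [a] => exact ⟨q, rfl⟩
  | f :: s :: t =>
    simp only [bestStep]
    split_ifs
    · exact ⟨(s, f), rfl⟩
    · exact ⟨q, rfl⟩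

theorem fold_some (L : List (List Int)) (q : Int × Int) :
    ∃ r, L.foldl bestStep (some q) = some r := by
  induction L generalizing q with
  | nil => exact ⟨q, rfl⟩
  | cons l t ih =>
    rw [List.foldl_cons]
    obtain ⟨r, hr⟩ := bestStep_some q l
    rw [hr]
    exact ih r

theorem fold_ne_none (L : List (List Int)) (b : Option (Int × Int))
    (h : ∃ l ∈ L, 2 ≤ l.length) : ∃ r, L.foldl bestStep b = some r := by
  induction L generalizing b with
  | nil => simp at h
  | cons l t ih =>
    rw [List.foldl_cons]
    obtain ⟨l', hl', hlen⟩ := h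
    rcases List.mem_cons.1 hl' with rfl | hmem
    · match l', hlen with
      | f :: s :: r, _ =>
        match b with
        | none => exact fold_some t (s, f)
        | some q => obtain ⟨r', hr'⟩ := bestStep_some q (f :: s :: r); rw [hr']; exact fold_some t r'
    · exact ih _ ⟨l', hmem, hlen⟩

theorem fold_lt (m : Int) (L : List (List Int)) :
    ∀ b, (∀ l ∈ L, ∀ i ∈ l, i < m) → (∀ q, b = some q → q.1 < m) →
      ∀ q, L.foldl bestStep b = some q → q.1 < m := by
  induction L with
  | nil => intro b _ hb q hq; exact hb q hq
  | cons l t ih =>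
    intro b hL hb q hq
    rw [List.foldl_cons] at hq
    refine ih _ (fun l' hl' => hL l' (List.mem_cons_of_mem _ hl')) ?_ q hq
    intro q' hq'
    match l, b, hq' with
    | [], b, hq' => exact hb q' hq'
    | [a], b, hq' => exact hb q' hq'
    | f :: s :: r, none, hq' =>
      simp only [bestStep] at hq'
      cases hq'
      exact hL (f :: s :: r) (List.mem_cons_self ..) s (by simp)
    | f :: s :: r, some b0, hq' =>
      simp only [bestStep] at hq'
      split_ifs at hq'
      · cases hq'
        exact hL (f :: s :: r) (List.mem_cons_self ..) s (by simp)
      · cases hq'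
        exact hb _ rfl

theorem fold_top (m f : Int) (L : List (List Int)) :
    (∀ l ∈ L, ∀ i ∈ l, i < m) → (∃ l ∈ L, 2 ≤ l.length) →
      L.foldl bestStep (some (m, f)) = L.foldl bestStep none := by
  induction L with
  | nil => intro _ h; simp at h
  | cons l t ih =>
    intro hlt hex
    rw [List.foldl_cons, List.foldl_cons]
    match l with
    | [] =>
      refine ih (fun l' hl' => hlt l' (List.mem_cons_of_mem _ hl')) ?_
      obtain ⟨l', hl', hlen⟩ := hex
      rcases List.mem_cons.1 hl' with rfl | hmem
      · simp at hlen
      · exact ⟨l', hmem, hlen⟩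
    | [a] =>
      refine ih (fun l' hl' => hlt l' (List.mem_cons_of_mem _ hl')) ?_
      obtain ⟨l', hl', hlen⟩ := hex
      rcases List.mem_cons.1 hl' with rfl | hmem
      · simp at hlen
      · exact ⟨l', hmem, hlen⟩
    | a :: s :: r =>
      have hs : s < m := hlt (a :: s :: r) (List.mem_cons_self ..) s (by simp)
      simp only [bestStep, if_pos hs]

theorem attrBest_eq (w : List Int) :
    attrBest w = ((PySem.Set.ofList w).map (fun v => posList w v)).foldl bestStep none := by
  unfold attrBest; rw [occ_values]

theorem Bv_nodup (vals : List Int) (h : vals.Nodup) : Bv vals = 1 := by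
  unfold Bv
  rw [attrBest_eq, fold_short]
  intro l hl
  obtain ⟨v, _, rfl⟩ := List.mem_map.1 hl
  rw [posList_length]
  exact List.nodup_iff_count_le_one.1 h v

theorem B_snoc (vals : List Int) (x : Int) :
    Bv (vals ++ [x]) = if ¬ vals.Nodup then Bv vals else snocVal vals x := by
  have hofl : PySem.Set.ofList (vals ++ [x]) = PySem.Set.add (PySem.Set.ofList vals) x := by
    rw [PySem.Set.ofList_eq_foldl, PySem.Set.ofList_eq_foldl, List.foldl_append,
      List.foldl_cons, List.foldl_nil]
  by_cases hx : x ∈ vals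
  case neg =>
    -- new value: its singleton position list is appended and ignored by the fold
    have hpx : posList vals x = [] := by
      rw [List.eq_nil_iff_length_eq_zero, posList_length, List.count_eq_zero]
      exact hx
    have hG : (PySem.Set.ofList (vals ++ [x])).map (fun v => posList (vals ++ [x]) v)
        = (PySem.Set.ofList vals).map (fun v => posList vals v) ++ [[(vals.length : Int)]] := by
      rw [hofl, show PySem.Set.add (PySem.Set.ofList vals) x = PySem.Set.ofList vals ++ [x] by
        simp [PySem.Set.add, PySem.Set.mem_ofList, hx]]
      rw [List.map_append, List.map_cons, List.map_nil]
      congr 1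
      · apply List.map_congr_left
        intro v hv
        rw [PySem.Set.mem_ofList] at hv
        have hvx : v ≠ x := fun he => hx (he ▸ hv)
        rw [posList_snoc, if_neg hvx, List.append_nil]
      · rw [posList_snoc, if_pos rfl, hpx, List.nil_append]
    have hBv : Bv (vals ++ [x]) = Bv vals := by
      unfold Bv
      rw [attrBest_eq, attrBest_eq, hG, List.foldl_append, List.foldl_cons, List.foldl_nil,
        bestStep_short _ _ (by simp)]
    rw [hBv]
    by_cases hd : vals.Nodup
    · rw [if_neg (by simpa using hd), snocVal, if_neg hx, Bv_nodup vals hd]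
    · rw [if_pos hd]
  case pos =>
    have hSx : PySem.Set.ofList (vals ++ [x]) = PySem.Set.ofList vals := by
      rw [hofl]; simp [PySem.Set.add, PySem.Set.mem_ofList, hx]
    obtain ⟨S1, S2, hsplit⟩ := List.mem_iff_append.mp
      (show x ∈ PySem.Set.ofList vals by rw [PySem.Set.mem_ofList]; exact hx)
    have hnd : (S1 ++ x :: S2).Nodup := hsplit ▸ PySem.Set.nodup_ofList vals
    rw [List.nodup_append] at hnd
    obtain ⟨hnd1, hnd2, hdisj⟩ := hnd
    have hx1 : ∀ v ∈ S1, v ≠ x := fun v hv => hdisj v hv x (List.mem_cons_self ..)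
    have hx2 : ∀ v ∈ S2, v ≠ x := by
      intro v hv he
      subst he
      exact (List.nodup_cons.1 hnd2).1 hv
    have hmap1 : ∀ (w : List Int), (∀ v ∈ w, v ≠ x) →
        w.map (fun v => posList (vals ++ [x]) v) = w.map (fun v => posList vals v) := by
      intro w hw
      apply List.map_congr_left
      intro v hv
      rw [posList_snoc, if_neg (hw v hv), List.append_nil]
    have hG' : (PySem.Set.ofList (vals ++ [x])).map (fun v => posList (vals ++ [x]) v)
        = S1.map (fun v => posList vals v)
          ++ [posList vals x ++ [(vals.length : Int)]]
          ++ S2.map (fun v => posList vals v) := by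
      rw [hSx, hsplit, List.map_append, List.map_cons, hmap1 S1 hx1, hmap1 S2 hx2,
        posList_snoc, if_pos rfl]
      simp
    have hG : (PySem.Set.ofList vals).map (fun v => posList vals v)
        = S1.map (fun v => posList vals v) ++ [posList vals x]
          ++ S2.map (fun v => posList vals v) := by
      rw [hsplit, List.map_append, List.map_cons]
      simp
    set L1 := S1.map (fun v => posList vals v) with hL1
    set L2 := S2.map (fun v => posList vals v) with hL2
    have hlt1 : ∀ l ∈ L1, ∀ i ∈ l, i < (vals.length : Int) := by
      intro l hl
      obtain ⟨v, _, rfl⟩ := List.mem_map.1 hl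
      exact posList_lt vals v
    have hlt2 : ∀ l ∈ L2, ∀ i ∈ l, i < (vals.length : Int) := by
      intro l hl
      obtain ⟨v, _, rfl⟩ := List.mem_map.1 hl
      exact posList_lt vals v
    have hcnt : 0 < vals.count x := List.count_pos_iff.2 hx
    by_cases h2 : 2 ≤ vals.count x
    · -- x already repeated: its first two positions are unchanged
      have hlen2 : 2 ≤ (posList vals x).length := by rw [posList_length]; exact h2
      obtain ⟨f, s, r, hfsr⟩ : ∃ f s r, posList vals x = f :: s :: r := by
        match hpl : posList vals x, hlen2 with
        | f :: s :: r, _ => exact ⟨f, s, r, by rw [← hpl]⟩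
        | [], h => simp [hpl] at hlen2
        | [a], h => simp [hpl] at hlen2
      have hnn : ¬ vals.Nodup := by
        rw [List.nodup_iff_count_le_one]
        push Not
        exact ⟨x, by omega⟩
      rw [if_pos hnn]
      unfold Bv
      rw [attrBest_eq, attrBest_eq, hG', hG, hfsr]
      simp only [List.cons_append, List.append_assoc, List.foldl_append, List.foldl_cons,
        List.foldl_nil]
      rfl
    · -- x occurs exactly once at index j
      have hc1 : vals.count x = 1 := by omega
      obtain ⟨j, hj⟩ : ∃ j, PySem.List.index? vals x = some j := by
        cases hidx : PySem.List.index? vals x with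
        | none => rw [PySem.List.index?_eq_none_iff] at hidx; exact absurd hx hidx
        | some j => exact ⟨j, rfl⟩
      obtain ⟨rest, hrest⟩ := posList_first vals x j hj
      have hrnil : rest = [] := by
        have := posList_length vals x
        rw [hrest, hc1] at this
        simpa using this
      subst hrnil
      unfold Bv
      rw [attrBest_eq, attrBest_eq, hG', hG, hrest]
      simp only [List.cons_append, List.nil_append, List.append_assoc, List.foldl_append,
        List.foldl_cons]
      rw [bestStep_short _ [(j : Int)] (by simp)]
      set b1 := L1.foldl bestStep none with hb1
      cases hb1v : b1 with
      | some q =>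
        have hq : q.1 < (vals.length : Int) := fold_lt _ L1 none hlt1 (by simp) q (hb1 ▸ hb1v)
        have hstep : bestStep (some q) [(j : Int), (vals.length : Int)] = some q := by
          simp only [bestStep]
          rw [if_neg (by omega)]
        rw [hstep]
        have hnn : ¬ vals.Nodup := by
          by_contra hd
          have : b1 = none := by
            rw [hb1]
            apply fold_short
            intro l hl
            obtain ⟨v, _, rfl⟩ := List.mem_map.1 hl
            rw [posList_length]
            exact List.nodup_iff_count_le_one.1 hd v
          rw [hb1v] at this
          cases this
        rw [if_pos hnn]
      | none =>
        have hstep : bestStep none [(j : Int), (vals.length : Int)]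
            = some ((vals.length : Int), (j : Int)) := by
          simp only [bestStep]
        rw [hstep]
        by_cases hd : vals.Nodup
        · have hfold2 : L2.foldl bestStep (some ((vals.length : Int), (j : Int)))
              = some ((vals.length : Int), (j : Int)) := by
            apply fold_short
            intro l hl
            obtain ⟨v, _, rfl⟩ := List.mem_map.1 hl
            rw [posList_length]
            exact List.nodup_iff_count_le_one.1 hd v
          rw [hfold2, if_neg (by simpa using hd)]
          rw [snocVal, if_pos hx, hj]
          rfl
        · -- some other value repeats; its entry must be in L2 (else b1 ≠ none)
          obtain ⟨v, hv2⟩ : ∃ v, 2 ≤ vals.count v := by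
            rw [List.nodup_iff_count_le_one] at hd
            push Not at hd
            obtain ⟨v, hv⟩ := hd
            exact ⟨v, by omega⟩
          have hvx : v ≠ x := fun he => by rw [he, hc1] at hv2; omega
          have hvS : v ∈ S1 ++ x :: S2 := by
            rw [← hsplit, PySem.Set.mem_ofList]
            exact List.count_pos_iff.1 (by omega)
          have hvL2 : posList vals v ∈ L2 := by
            rcases List.mem_append.1 hvS with h1 | h1
            · exfalso
              obtain ⟨r', hr'⟩ := fold_ne_none L1 none
                ⟨posList vals v, List.mem_map_of_mem h1, by rw [posList_length]; exact hv2⟩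
              rw [← hb1, hb1v] at hr'
              cases hr'
            · rcases List.mem_cons.1 h1 with h1 | h1
              · exact absurd h1 hvx
              · exact List.mem_map_of_mem h1
          rw [fold_top _ _ L2 hlt2
            ⟨posList vals v, hvL2, by rw [posList_length]; exact hv2⟩]
          rw [if_pos hd]

theorem Av_eq_Bv (vals : List Int) : Av vals = Bv vals := by
  induction vals using List.reverseRecOn with
  | nil => rfl
  | append_singleton vals x ih =>
    rw [A_snoc, B_snoc, ih]

-- ===== VERDICT (by name: the statement is the Claim_ definition above) =====
theorem attractor_length_spec : Claim_equal_attractor_length := by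
  intro diffusion _
  unfold Spec_attractor_length attractor_length attractor_length_alt
  exact Av_eq_Bv _
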